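-- pv_equiv track=rewrite | github.com/archanray/codiing_practice | message_crop_microsoft.py | solution
-- ===== SOURCE A (Python) =====
-- def solution(message, k):
--     words = message.split(" ")
--     length = 0
--     output = ""
--     for word in words:
--         if length + 1 + len(word) > k:
--             if length == 0:
--                 return "..."
--             else:
--                 return output+" ..."
--         else:
--             output = output + " " + word
--             length += len(word) + 1
--     return output
-- ===== SOURCE B (Python) =====
-- def solution(message, k):
--     words = message.split(" ")
--     # phase 1: inclusive cumulative costs (each word costs len(word)+1)
--     cum = []
--     total = 0
--     for w in words:
--         total += len(w) + 1
--         cum.append(total)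
--     # phase 2: cutoff = number of leading words whose cumulative cost fits in k
--     cut = 0
--     while cut < len(cum) and cum[cut] <= k:
--         cut += 1
--     # phase 3: construction
--     if cut == 0:
--         return "..."
--     res = " " + " ".join(words[:cut])
--     if cut < len(words):
--         res += " ..."
--     return res
-- ===== Notes on version B (the rewrite author's own statement) =====
-- stated objective: alternative
-- what changed: Replaces A's single loop that interleaves accumulation with early returns by three separate phases: build the cumulative-cost table (len(word)+1 each), count the leading entries that fit in k, then construct the result ('...' / leading-space join / ' ...' suffix) from that cutoff index.
import Mathlib
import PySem

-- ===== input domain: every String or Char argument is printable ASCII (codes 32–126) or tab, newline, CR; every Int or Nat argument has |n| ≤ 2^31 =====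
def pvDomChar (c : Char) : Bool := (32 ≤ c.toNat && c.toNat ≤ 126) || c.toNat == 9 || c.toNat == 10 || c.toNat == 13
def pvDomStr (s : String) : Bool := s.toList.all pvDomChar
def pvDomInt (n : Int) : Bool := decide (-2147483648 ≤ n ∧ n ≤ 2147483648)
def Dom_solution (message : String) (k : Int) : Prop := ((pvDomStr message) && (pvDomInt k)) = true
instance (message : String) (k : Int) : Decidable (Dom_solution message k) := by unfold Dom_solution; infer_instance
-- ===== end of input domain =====

-- B replaces A's interleaved accumulate-and-early-return loop by three separate phases
-- (cumulative-cost table, cutoff index, construction); objective: alternative decomposition, same cost.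

-- ===== PORT A =====
-- the for-loop of A, with its two early returns; state = (length, output)
def solutionLoop (words : List (List Char)) (length : Int) (output : List Char) (k : Int) : List Char :=
  match words with
  | [] => output
  | w :: ws =>
    if length + 1 + (w.length : Int) > k then
      if length = 0 then "...".toList else output ++ " ...".toList
    else solutionLoop ws (length + w.length + 1) (output ++ ' ' :: w) k

def solution (message : String) (k : Int) : String :=
  String.ofList (solutionLoop (PySem.Chars.splitOn message.toList [' ']) 0 [] k)

-- ===== PORT B =====
-- phase 1 of B: the cumulative-cost list (each word costs len+1)
def cumLoop (words : List (List Char)) (total : Int) (cum : List Int) : List Int :=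
  match words with
  | [] => cum
  | w :: ws => cumLoop ws (total + w.length + 1) (cum ++ [total + w.length + 1])

-- phase 2 of B: the while loop counting leading entries ≤ k
def cutLoop (cum : List Int) (k : Int) : Nat :=
  match cum with
  | [] => 0
  | c :: cs => if c ≤ k then cutLoop cs k + 1 else 0

def solution_alt (message : String) (k : Int) : String :=
  let words := PySem.Chars.splitOn message.toList [' ']
  let cut := cutLoop (cumLoop words 0 []) k
  if cut = 0 then "..."
  else
    let res := ' ' :: PySem.Chars.join [' '] (words.take cut)
    if cut < words.length then String.ofList (res ++ " ...".toList) else String.ofList res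

-- ===== PRECONDITION & SPEC =====
def Spec_solution (message : String) (k : Int) (out : String) : Prop := out = solution_alt message k
instance (message : String) (k : Int) (out : String) : Decidable (Spec_solution message k out) := by unfold Spec_solution; infer_instance

-- ===== CLAIM (what is proved, stated in full; the proofs are below) =====
def Claim_equal_solution : Prop := ∀ (message : String) (k : Int), Dom_solution message k → Spec_solution message k (solution message k)

-- ===== LEMMAS AND PROOFS =====

-- recursive characterisation of the cutoff with a running budget
def cutRec (words : List (List Char)) (b : Int) : Nat :=
  match words with
  | [] => 0
  | w :: ws => if (w.length : Int) + 1 ≤ b then cutRec ws (b - (w.length + 1)) + 1 else 0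

-- the cumulative list built from offset t
def cumFrom (t : Int) (words : List (List Char)) : List Int :=
  match words with
  | [] => []
  | w :: ws => (t + w.length + 1) :: cumFrom (t + w.length + 1) ws

lemma cumLoop_eq : ∀ (words : List (List Char)) (t : Int) (acc : List Int),
    cumLoop words t acc = acc ++ cumFrom t words := by
  intro words
  induction words with
  | nil => intro t acc; simp [cumLoop, cumFrom]
  | cons w ws ih => intro t acc; simp [cumLoop, cumFrom, ih]

lemma cutLoop_cumFrom : ∀ (words : List (List Char)) (t k : Int),
    cutLoop (cumFrom t words) k = cutRec words (k - t) := by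
  intro words
  induction words with
  | nil => intro t k; simp [cutLoop, cumFrom, cutRec]
  | cons w ws ih =>
    intro t k
    simp only [cumFrom, cutLoop, cutRec, ih]
    have : k - (t + ↑w.length + 1) = k - t - (↑w.length + 1) := by ring
    rw [this]
    split_ifs with h1 h2 h2 <;> first | rfl | omega

lemma cut_eq (words : List (List Char)) (k : Int) :
    cutLoop (cumLoop words 0 []) k = cutRec words k := by
  rw [cumLoop_eq]
  simpa using cutLoop_cumFrom words 0 k

-- the one-step lemma: when the first word fits, A's loop step matches B's construction,
-- given the loop's value on the tail (the induction hypothesis / loop_eq on the tail)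
lemma step (w : List Char) (ws : List (List Char)) (k len : Int) (output : List Char)
    (hfit : ¬ (len + 1 + (w.length : Int) > k))
    (hws : solutionLoop ws (len + w.length + 1) (output ++ ' ' :: w) k =
      if cutRec ws (k - (len + w.length + 1)) = 0 then
        (if ws = [] then output ++ ' ' :: w else (output ++ ' ' :: w) ++ " ...".toList)
      else
        (if cutRec ws (k - (len + w.length + 1)) < ws.length then
          (output ++ ' ' :: w) ++ ' ' :: PySem.Chars.join [' '] (ws.take (cutRec ws (k - (len + w.length + 1)))) ++ " ...".toList
        else
          (output ++ ' ' :: w) ++ ' ' :: PySem.Chars.join [' '] (ws.take (cutRec ws (k - (len + w.length + 1)))))) :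
    cutRec (w :: ws) (k - len) ≠ 0 ∧
    solutionLoop (w :: ws) len output k =
      (if cutRec (w :: ws) (k - len) < (w :: ws).length then
        output ++ ' ' :: PySem.Chars.join [' '] ((w :: ws).take (cutRec (w :: ws) (k - len))) ++ " ...".toList
      else
        output ++ ' ' :: PySem.Chars.join [' '] ((w :: ws).take (cutRec (w :: ws) (k - len)))) := by
  have hfit' : (w.length : Int) + 1 ≤ k - len := by omega
  have hc : cutRec (w :: ws) (k - len) = cutRec ws (k - len - (w.length + 1)) + 1 := by
    simp only [cutRec]; rw [if_pos hfit']
  have hb : k - (len + (w.length : Int) + 1) = k - len - ((w.length : Int) + 1) := by ring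
  rw [hb] at hws
  refine ⟨by rw [hc]; exact Nat.succ_ne_zero _, ?_⟩
  simp only [solutionLoop, if_neg hfit]
  rw [hws, hc]
  generalize hg : cutRec ws (k - len - ((w.length : Int) + 1)) = c
  rcases Nat.eq_zero_or_pos c with rfl | hcpos
  · rcases ws with _ | ⟨q, rest⟩
    · simp [PySem.Chars.join_singleton]
    · simp [PySem.Chars.join_singleton]
  · obtain ⟨c', rfl⟩ : ∃ c', c = c' + 1 := ⟨c - 1, by omega⟩
    rcases ws with _ | ⟨q, rest⟩
    · simp [cutRec] at hg
    · rw [if_neg (Nat.succ_ne_zero c')]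
      simp only [List.take_succ_cons, List.length_cons]
      rw [PySem.Chars.join_cons_cons]
      split_ifs with h1 h2 h2 <;> first | omega | simp

-- main loop invariant: for a positive running length, A's loop produces B's construction
lemma loop_eq : ∀ (words : List (List Char)) (k len : Int) (output : List Char),
    0 < len →
    solutionLoop words len output k =
      if cutRec words (k - len) = 0 then
        (if words = [] then output else output ++ " ...".toList)
      else
        (if cutRec words (k - len) < words.length then
          output ++ ' ' :: PySem.Chars.join [' '] (words.take (cutRec words (k - len))) ++ " ...".toList
        else
          output ++ ' ' :: PySem.Chars.join [' '] (words.take (cutRec words (k - len)))) := by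
  intro words
  induction words with
  | nil => intro k len output _; simp [solutionLoop, cutRec]
  | cons w ws ih =>
    intro k len output hlen
    by_cases hfit : len + 1 + (w.length : Int) > k
    · -- first word does not fit: A returns output ++ " ..."; cutRec = 0
      have hc : cutRec (w :: ws) (k - len) = 0 := by
        simp only [cutRec]; rw [if_neg (by omega)]
      simp only [solutionLoop, if_pos hfit, if_neg (by omega : ¬ len = 0), hc]
      simp
    · obtain ⟨hne, heq⟩ := step w ws k len output hfit (ih k (len + w.length + 1) (output ++ ' ' :: w) (by omega))
      rw [heq, if_neg hne]

lemma splitOn_go_ne_nil (sep : List Char) : ∀ (fuel : Nat) (l cur : List Char) (acc : List (List Char)),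
    PySem.Chars.splitOn.go sep fuel l cur acc ≠ [] := by
  intro fuel
  induction fuel with
  | zero => intro l cur acc; simp [PySem.Chars.splitOn.go]
  | succ n ih =>
    intro l cur acc
    rcases l with _ | ⟨c, rest⟩
    · simp [PySem.Chars.splitOn.go]
    · rw [PySem.Chars.splitOn.go]
      split_ifs <;> apply ih

lemma splitOn_ne_nil (s sep : List Char) : PySem.Chars.splitOn s sep ≠ [] := by
  unfold PySem.Chars.splitOn; apply splitOn_go_ne_nil

-- ===== VERDICT (by name: the statement is the Claim_ definition above) =====
theorem solution_spec : Claim_equal_solution := by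
  intro message k _
  unfold Spec_solution solution solution_alt
  simp only [cut_eq]
  rcases hW : PySem.Chars.splitOn message.toList [' '] with _ | ⟨w, ws⟩
  · exact absurd hW (splitOn_ne_nil _ _)
  · by_cases hfit : (0 : Int) + 1 + (w.length : Int) > k
    · have hc : cutRec (w :: ws) k = 0 := by
        simp only [cutRec]; rw [if_neg (by omega)]
      simp only [solutionLoop, if_pos hfit, hc]
      rfl
    · obtain ⟨hne, heq⟩ := step w ws k 0 [] hfit
        (loop_eq ws k (0 + w.length + 1) ([] ++ ' ' :: w) (by positivity))
      rw [Int.sub_zero] at hne heq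
      rw [heq, if_neg hne]
      simp only [List.nil_append]
      split <;> rfl
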